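-- pv_equiv track=rewrite | github.com/r10222035/3-4-Higgs-Collider-Study | Analysis/chisq_method.py | same_diHiggs
-- ===== SOURCE A (Python) =====
-- import itertools
--
-- def same_diHiggs(pair1, pair2):
--     # pair = [1,2,3,4]
--
--     h1_true = {pair1[0],pair1[1]}
--     h2_true = {pair1[2],pair1[3]}
--
--     h1_test = {pair2[0],pair2[1]}
--     h2_test = {pair2[2],pair2[3]}
--
--     test_h = [h1_test, h2_test]
--
--     same = False
--     for id1, id2 in itertools.permutations([0,1]):
--         h1 = test_h[id1]
--         h2 = test_h[id2]
--         if h1_true == h1: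
--             if h2_true == h2:
--                 same = True
--                 break
--
--     return same
-- ===== SOURCE B (Python) =====
-- def same_diHiggs(pair1, pair2):
--     true_sets = {frozenset((pair1[0], pair1[1])), frozenset((pair1[2], pair1[3]))}
--     test_sets = {frozenset((pair2[0], pair2[1])), frozenset((pair2[2], pair2[3]))}
--     return true_sets == test_sets
-- ===== Notes on version B (the rewrite author's own statement) =====
-- stated objective: idiomatic
-- what changed: Replaces the itertools.permutations loop over pairing orders by a single comparison of two sets of frozensets, which absorbs the Higgs-swap symmetry directly.
import Mathlib
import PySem

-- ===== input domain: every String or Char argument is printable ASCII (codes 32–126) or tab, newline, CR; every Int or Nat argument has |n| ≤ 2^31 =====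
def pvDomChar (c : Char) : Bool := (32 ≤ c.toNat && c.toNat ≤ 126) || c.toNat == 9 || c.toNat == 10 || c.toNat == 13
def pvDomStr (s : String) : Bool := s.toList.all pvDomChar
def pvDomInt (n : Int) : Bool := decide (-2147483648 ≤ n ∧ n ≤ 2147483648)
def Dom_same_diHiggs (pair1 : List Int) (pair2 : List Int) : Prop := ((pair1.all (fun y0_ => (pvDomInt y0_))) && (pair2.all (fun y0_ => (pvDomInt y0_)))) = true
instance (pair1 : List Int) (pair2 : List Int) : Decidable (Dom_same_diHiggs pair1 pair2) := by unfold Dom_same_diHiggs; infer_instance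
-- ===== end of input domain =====

-- B replaces A's permutations loop by one unordered comparison of two sets of frozensets (idiomatic, same cost).

-- ===== PORT A =====
-- the 'for id1, id2 in itertools.permutations([0,1]): … break' loop, step for step
-- (the '| _ => false' branch is unreachable: every element of permutations [0,1] 2 has length 2)
def sameLoopA (h1_true h2_true : PySem.Set Int) (test_h : List (PySem.Set Int)) :
    List (List Int) → Bool
  | [] => false
  | p :: rest =>
    match p with
    | [id1, id2] =>
      let h1 := (PySem.List.pyGet? test_h id1).getD PySem.Set.empty
      let h2 := (PySem.List.pyGet? test_h id2).getD PySem.Set.empty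
      if PySem.Set.equal h1_true h1 then
        if PySem.Set.equal h2_true h2 then true
        else sameLoopA h1_true h2_true test_h rest
      else sameLoopA h1_true h2_true test_h rest
    | _ => false

def same_diHiggs (pair1 : List Int) (pair2 : List Int) : Bool :=
  let h1_true : PySem.Set Int := PySem.Set.ofList [(PySem.List.pyGet? pair1 0).getD 0, (PySem.List.pyGet? pair1 1).getD 0]
  let h2_true : PySem.Set Int := PySem.Set.ofList [(PySem.List.pyGet? pair1 2).getD 0, (PySem.List.pyGet? pair1 3).getD 0]
  let h1_test : PySem.Set Int := PySem.Set.ofList [(PySem.List.pyGet? pair2 0).getD 0, (PySem.List.pyGet? pair2 1).getD 0]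
  let h2_test : PySem.Set Int := PySem.Set.ofList [(PySem.List.pyGet? pair2 2).getD 0, (PySem.List.pyGet? pair2 3).getD 0]
  let test_h : List (PySem.Set Int) := [h1_test, h2_test]
  sameLoopA h1_true h2_true test_h (PySem.List.permutations [(0 : Int), 1] 2)

-- ===== PORT B =====
-- a Python 'set of frozensets' is ported by hand (no lawful BEq on PySem.Set): membership,
-- add and == below are exactly Python's set semantics with frozenset equality (= Set.equal);
-- this hand port is exact because set-of-sets equality is order- and duplicate-insensitive.
def fsMem (x : PySem.Set Int) (s : List (PySem.Set Int)) : Bool :=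
  s.any (fun y => PySem.Set.equal x y)

def fsAdd (s : List (PySem.Set Int)) (x : PySem.Set Int) : List (PySem.Set Int) :=
  if fsMem x s then s else s ++ [x]

def fsSetEq (s t : List (PySem.Set Int)) : Bool :=
  s.all (fun x => fsMem x t) && t.all (fun x => fsMem x s)

def same_diHiggs_alt (pair1 : List Int) (pair2 : List Int) : Bool :=
  let f1 : PySem.Set Int := PySem.Set.ofList [(PySem.List.pyGet? pair1 0).getD 0, (PySem.List.pyGet? pair1 1).getD 0]
  let f2 : PySem.Set Int := PySem.Set.ofList [(PySem.List.pyGet? pair1 2).getD 0, (PySem.List.pyGet? pair1 3).getD 0]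
  let g1 : PySem.Set Int := PySem.Set.ofList [(PySem.List.pyGet? pair2 0).getD 0, (PySem.List.pyGet? pair2 1).getD 0]
  let g2 : PySem.Set Int := PySem.Set.ofList [(PySem.List.pyGet? pair2 2).getD 0, (PySem.List.pyGet? pair2 3).getD 0]
  let true_sets := fsAdd (fsAdd [] f1) f2
  let test_sets := fsAdd (fsAdd [] g1) g2
  fsSetEq true_sets test_sets

-- ===== PRECONDITION & SPEC =====
-- Pre_ excludes exactly the inputs where A raises IndexError: a list with fewer than 4 elements.
def Pre_same_diHiggs (pair1 : List Int) (pair2 : List Int) : Prop :=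
  4 ≤ pair1.length ∧ 4 ≤ pair2.length
instance (pair1 : List Int) (pair2 : List Int) : Decidable (Pre_same_diHiggs pair1 pair2) := by unfold Pre_same_diHiggs; infer_instance

def pvWitness_same_diHiggs : List Int × List Int := ([1, 2, 3, 4], [2, 1, 4, 3])

def Spec_same_diHiggs (pair1 : List Int) (pair2 : List Int) (out : Bool) : Prop := out = same_diHiggs_alt pair1 pair2
instance (pair1 : List Int) (pair2 : List Int) (out : Bool) : Decidable (Spec_same_diHiggs pair1 pair2 out) := by unfold Spec_same_diHiggs; infer_instance

-- ===== CLAIM (what is proved, stated in full; the proofs are below) =====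
def Claim_equal_same_diHiggs : Prop := ∀ (pair1 : List Int) (pair2 : List Int), Dom_same_diHiggs pair1 pair2 → Pre_same_diHiggs pair1 pair2 → Spec_same_diHiggs pair1 pair2 (same_diHiggs pair1 pair2)

-- ===== LEMMAS AND PROOFS =====

theorem setEqual_symm {a b : PySem.Set Int} (h : PySem.Set.equal a b = true) :
    PySem.Set.equal b a = true := by
  rw [PySem.Set.equal_iff] at *
  intro x; exact (h x).symm

theorem setEqual_trans {a b c : PySem.Set Int} (h1 : PySem.Set.equal a b = true)
    (h2 : PySem.Set.equal b c = true) : PySem.Set.equal a c = true := by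
  rw [PySem.Set.equal_iff] at *
  intro x; exact (h1 x).trans (h2 x)

-- the core fact: Python's {X,Y} == {Z,W} on frozensets is the two matchings disjunction
theorem outer_eq (X Y Z W : PySem.Set Int) :
    fsSetEq (fsAdd (fsAdd [] X) Y) (fsAdd (fsAdd [] Z) W)
      = ((PySem.Set.equal X Z && PySem.Set.equal Y W)
         || (PySem.Set.equal X W && PySem.Set.equal Y Z)) := by
  have hadd : ∀ (u v : PySem.Set Int), fsAdd (fsAdd [] u) v
      = if PySem.Set.equal v u = true then [u] else [u, v] := by
    intro u v
    cases h : PySem.Set.equal v u <;> simp [fsAdd, fsMem, h]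
  rw [hadd, hadd]
  by_cases hYX : PySem.Set.equal Y X = true <;>
    by_cases hWZ : PySem.Set.equal W Z = true <;>
      rw [Bool.eq_iff_iff] <;>
      simp only [hYX, hWZ, if_true, if_false, Bool.false_eq_true,
        fsSetEq, fsMem, List.all_cons, List.all_nil, List.any_cons,
        List.any_nil, Bool.and_eq_true, Bool.or_eq_true, Bool.and_true, Bool.or_false]
  · -- sets collapse to [X] and [Z]
    constructor
    · rintro ⟨h1, _⟩
      exact Or.inl ⟨h1, setEqual_trans (setEqual_trans hYX h1) (setEqual_symm hWZ)⟩
    · rintro (⟨h1, _⟩ | ⟨h1, _⟩)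
      · exact ⟨h1, setEqual_symm h1⟩
      · exact ⟨setEqual_trans h1 hWZ, setEqual_symm (setEqual_trans h1 hWZ)⟩
  · -- [X] vs [Z, W]: both sides false
    constructor
    · rintro ⟨_, h2, h3⟩
      exact absurd (setEqual_trans h3 (setEqual_symm h2)) hWZ
    · rintro (⟨h1, h2⟩ | ⟨h1, h2⟩)
      · exact absurd (setEqual_trans (setEqual_symm h2) (setEqual_trans hYX h1)) hWZ
      · exact absurd (setEqual_trans (setEqual_symm h1) (setEqual_trans (setEqual_symm hYX) h2)) hWZ
  · -- [X, Y] vs [Z]: both sides false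
    constructor
    · rintro ⟨⟨h1, h2⟩, _⟩
      exact absurd (setEqual_trans h2 (setEqual_symm h1)) hYX
    · rintro (⟨h1, h2⟩ | ⟨h1, h2⟩)
      · exact absurd (setEqual_trans (setEqual_trans h2 hWZ) (setEqual_symm h1)) hYX
      · exact absurd (setEqual_trans h2 (setEqual_symm (setEqual_trans h1 hWZ))) hYX
  · -- [X, Y] vs [Z, W]
    constructor
    · rintro ⟨⟨hX | hX, hY | hY⟩, _⟩
      · exact absurd (setEqual_trans hY (setEqual_symm hX)) hYX
      · exact Or.inl ⟨hX, hY⟩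
      · exact Or.inr ⟨hX, hY⟩
      · exact absurd (setEqual_trans hY (setEqual_symm hX)) hYX
    · rintro (⟨h1, h2⟩ | ⟨h1, h2⟩)
      · exact ⟨⟨Or.inl h1, Or.inr h2⟩, Or.inl (setEqual_symm h1), Or.inr (setEqual_symm h2)⟩
      · exact ⟨⟨Or.inr h1, Or.inl h2⟩, Or.inr (setEqual_symm h2), Or.inl (setEqual_symm h1)⟩

theorem boolShape (b1 b2 b3 b4 : Bool) :
    (if b1 then (if b2 then true else (if b3 then (if b4 then true else false) else false))
     else (if b3 then (if b4 then true else false) else false))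
      = ((b1 && b2) || (b3 && b4)) := by
  cases b1 <;> cases b2 <;> cases b3 <;> cases b4 <;> rfl

theorem perm01 : PySem.List.permutations [(0 : Int), 1] 2 = [[0, 1], [1, 0]] := by decide

theorem same_diHiggs_spec : Claim_equal_same_diHiggs := by
  intro pair1 pair2 _ hpre
  obtain ⟨h1, h2⟩ := hpre
  rcases pair1 with _ | ⟨a, _ | ⟨b, _ | ⟨c, _ | ⟨d, r1⟩⟩⟩⟩ <;> simp at h1 <;> try omega
  rcases pair2 with _ | ⟨e, _ | ⟨f, _ | ⟨g, _ | ⟨k, r2⟩⟩⟩⟩ <;> simp at h2 <;> try omega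
  unfold Spec_same_diHiggs same_diHiggs same_diHiggs_alt
  have gi : ∀ (x1 x2 x3 x4 : Int) (r : List Int),
      (PySem.List.pyGet? (x1 :: x2 :: x3 :: x4 :: r) 0).getD 0 = x1 ∧
      (PySem.List.pyGet? (x1 :: x2 :: x3 :: x4 :: r) 1).getD 0 = x2 ∧
      (PySem.List.pyGet? (x1 :: x2 :: x3 :: x4 :: r) 2).getD 0 = x3 ∧
      (PySem.List.pyGet? (x1 :: x2 :: x3 :: x4 :: r) 3).getD 0 = x4 := by
    intro x1 x2 x3 x4 r
    refine ⟨?_, ?_, ?_, ?_⟩ <;> simp [PySem.List.pyGet?_of_nonneg]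
  obtain ⟨ga1, ga2, ga3, ga4⟩ := gi a b c d r1
  obtain ⟨gb1, gb2, gb3, gb4⟩ := gi e f g k r2
  rw [ga1, ga2, ga3, ga4, gb1, gb2, gb3, gb4, perm01, outer_eq]
  simp only [sameLoopA]
  have p0 : (PySem.List.pyGet? [PySem.Set.ofList [e, f], PySem.Set.ofList [g, k]] (0 : Int)).getD PySem.Set.empty
      = PySem.Set.ofList [e, f] := by simp
  have p1 : (PySem.List.pyGet? [PySem.Set.ofList [e, f], PySem.Set.ofList [g, k]] (1 : Int)).getD PySem.Set.empty
      = PySem.Set.ofList [g, k] := by simp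
  rw [p0, p1]
  exact boolShape _ _ _ _
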